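-- pv_equiv track=rewrite | github.com/Ladnopoka/Python-Practice | Leetcode_6_binary_trees_replace_values.py | group_siblings_by_parent
-- ===== SOURCE A (Python) =====
-- def group_siblings_by_parent(values, parents):
--     """
--     Helper function to group sibling nodes that have the same parent.
--     :param values: List of node values at the current level.
--     :param parents: List of parent nodes corresponding to the node values.
--     :return: List of sibling groups.
--     """
--     siblings_dict = {}
--     for i in range(len(values)):
--         parent = parents[i]
--         if parent not in siblings_dict:
--             siblings_dict[parent] = []
--         siblings_dict[parent].append(values[i])
--
--     # Return a list of sibling groups
--     return [sibling_group for sibling_group in siblings_dict.values()]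
-- ===== SOURCE B (Python) =====
-- def group_siblings_by_parent(values, parents):
--     """Group sibling values by parent: first collect distinct parents in
--     first-appearance order (set + list), then build each group by one
--     filtering pass over zip(values, parents)."""
--     seen = set()
--     keys = []
--     for i in range(len(values)):
--         p = parents[i]
--         if p not in seen:
--             seen.add(p)
--             keys.append(p)
--     return [[v for v, q in zip(values, parents) if q == p] for p in keys]
-- ===== Notes on version B (the rewrite author's own statement) =====
-- stated objective: alternative
-- what changed: Replaces the single dict-building indexed loop with a two-phase strategy: one pass collecting distinct parents in first-appearance order (set + list), then one filtering comprehension over zip(values, parents) per distinct parent.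
import Mathlib
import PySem

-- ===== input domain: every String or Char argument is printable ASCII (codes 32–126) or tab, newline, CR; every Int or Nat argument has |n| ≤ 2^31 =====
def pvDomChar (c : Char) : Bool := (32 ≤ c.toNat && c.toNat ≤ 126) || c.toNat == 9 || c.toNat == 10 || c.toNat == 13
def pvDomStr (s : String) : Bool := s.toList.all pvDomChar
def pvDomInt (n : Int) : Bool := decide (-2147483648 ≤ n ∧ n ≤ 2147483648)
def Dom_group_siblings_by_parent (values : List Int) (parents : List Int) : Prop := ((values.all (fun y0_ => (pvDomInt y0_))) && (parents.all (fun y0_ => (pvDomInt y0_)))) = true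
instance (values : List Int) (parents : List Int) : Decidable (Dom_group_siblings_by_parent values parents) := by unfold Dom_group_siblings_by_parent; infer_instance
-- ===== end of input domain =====

-- B groups siblings in two phases (distinct parents first, then one filtering pass per parent)
-- instead of A's single dict-building indexed loop: a different decomposition of the same task.


-- ===== PORT A =====
-- pyGetD is exact here: under Pre_ every index i < values.length ≤ parents.length is in range.
def group_siblings_by_parent (values : List Int) (parents : List Int) : List (List Int) :=
  let d := (PySem.List.pyRange 0 (values.length : Int) 1).foldl
    (fun (d : PySem.Dict Int (List Int)) i =>
      let parent := PySem.List.pyGetD parents i 0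
      let d := if d.contains parent then d else d.insert parent []
      d.modify parent [] (· ++ [PySem.List.pyGetD values i 0]))
    PySem.Dict.empty
  d.values

-- ===== PORT B =====
-- pyGetD is exact under Pre_ (same index range as A's loop).
def group_siblings_by_parent_alt (values : List Int) (parents : List Int) : List (List Int) :=
  let st := (PySem.List.pyRange 0 (values.length : Int) 1).foldl
    (fun (st : PySem.Set Int × List Int) i =>
      let p := PySem.List.pyGetD parents i 0
      if PySem.Set.contains st.1 p then st else (PySem.Set.add st.1 p, st.2 ++ [p]))
    (PySem.Set.empty, [])
  st.2.map (fun p => ((values.zip parents).filter (fun vq => vq.2 == p)).map (·.1))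

-- ===== PRECONDITION & SPEC =====
-- A indexes parents[i] for every i < len(values): it raises IndexError iff parents is shorter
-- than values; exactly those inputs are excluded (B raises there too).
def Pre_group_siblings_by_parent (values : List Int) (parents : List Int) : Prop :=
  values.length ≤ parents.length
instance (values : List Int) (parents : List Int) : Decidable (Pre_group_siblings_by_parent values parents) := by unfold Pre_group_siblings_by_parent; infer_instance
def pvWitness_group_siblings_by_parent : List Int × List Int := ([1, 2, 3], [7, 8, 7])

def Spec_group_siblings_by_parent (values : List Int) (parents : List Int) (out : List (List Int)) : Prop := out = group_siblings_by_parent_alt values parents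
instance (values : List Int) (parents : List Int) (out : List (List Int)) : Decidable (Spec_group_siblings_by_parent values parents out) := by unfold Spec_group_siblings_by_parent; infer_instance

-- ===== CLAIM (what is proved, stated in full; the proofs are below) =====
def Claim_equal_group_siblings_by_parent : Prop := ∀ (values : List Int) (parents : List Int), Dom_group_siblings_by_parent values parents → Pre_group_siblings_by_parent values parents → Spec_group_siblings_by_parent values parents (group_siblings_by_parent values parents)

-- ===== LEMMAS AND PROOFS =====

lemma stepA_eq_modify (d : PySem.Dict Int (List Int)) (p v : Int) :
    (let d' := if d.contains p then d else d.insert p []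
     d'.modify p [] (· ++ [v])) = d.modify p [] (· ++ [v]) := by
  simp only []
  split_ifs with h
  · rfl
  · have h' : d.contains p = false := by simpa using h
    simp [PySem.Dict.modify, PySem.Dict.insert_insert_self, PySem.Dict.getD_insert_self,
      PySem.Dict.getD_of_not_contains d ([] : List Int) h']

lemma indexed_map_eq_zip (values parents : List Int) (h : values.length ≤ parents.length) :
    (PySem.List.pyRange 0 (values.length : Int) 1).map
      (fun i => ((PySem.List.pyGetD parents i 0 : Int), (PySem.List.pyGetD values i 0 : Int)))
      = parents.zip values := by
  rw [show PySem.List.pyRange 0 (values.length : Int) 1 = PySem.List.pyRange 0 (values.length : Int) from rfl,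
    PySem.List.pyRange_zero_natCast, List.map_map]
  apply List.ext_getElem
  · simp [List.length_zip]; omega
  · intro i h1 h2
    simp [PySem.List.pyGetD_natCast, List.getElem_zip, List.getD_eq_getElem?_getD,
      (by simp at h1; omega : i < parents.length),
      (by simp at h1; omega : i < values.length)]

lemma zip_eq_take_zip (ps vs : List Int) : ps.zip vs = (ps.take vs.length).zip vs := by
  induction ps generalizing vs with
  | nil => simp
  | cons p ps ih =>
    cases vs with
    | nil => simp
    | cons v vs => simpa using ih vs

lemma keys_fold (pref : List Int) (s : PySem.Set Int) :
    pref.foldl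
      (fun (st : PySem.Set Int × List Int) p =>
        if PySem.Set.contains st.1 p then st else (PySem.Set.add st.1 p, st.2 ++ [p]))
      (s, s) = (pref.foldl PySem.Set.add s, pref.foldl PySem.Set.add s) := by
  induction pref generalizing s with
  | nil => rfl
  | cons p pref ih =>
    have hstep : (if PySem.Set.contains s p then (s, s)
        else (PySem.Set.add s p, s ++ [p])) = ((PySem.Set.add s p : PySem.Set Int), (PySem.Set.add s p : List Int)) := by
      by_cases h : PySem.Set.contains s p
      · have hm : p ∈ s := (PySem.Set.contains_iff s p).1 h
        rw [if_pos h, PySem.Set.add_of_mem hm]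
      · have hm : p ∉ s := fun hm => h ((PySem.Set.contains_iff s p).2 hm)
        rw [if_neg h, PySem.Set.add_of_not_mem hm]
    simp only [List.foldl_cons, hstep, ih]

lemma indexed_map_parents (values parents : List Int) (h : values.length ≤ parents.length) :
    (PySem.List.pyRange 0 (values.length : Int) 1).map
      (fun i => (PySem.List.pyGetD parents i 0 : Int)) = parents.take values.length := by
  have := congrArg (List.map Prod.fst) (indexed_map_eq_zip values parents h)
  simp only [List.map_map] at this
  have hk : (parents.zip values).map Prod.fst = parents.take values.length := by
    rw [zip_eq_take_zip parents values]
    exact List.map_fst_zip (by simp)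
  rw [← hk]
  exact this

theorem group_siblings_by_parent_AB (values parents : List Int)
    (h : values.length ≤ parents.length) :
    group_siblings_by_parent values parents = group_siblings_by_parent_alt values parents := by
  have hstep : (fun (d : PySem.Dict Int (List Int)) (i : Int) =>
      let parent := PySem.List.pyGetD parents i 0
      let d := if d.contains parent then d else d.insert parent []
      d.modify parent [] (· ++ [PySem.List.pyGetD values i 0]))
      = fun d i => PySem.Dict.modify d (PySem.List.pyGetD parents i 0) []
          (· ++ [PySem.List.pyGetD values i 0]) :=
    funext fun d => funext fun i => stepA_eq_modify d _ _
  have hA : group_siblings_by_parent values parents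
      = ((PySem.Set.ofList ((parents.zip values).map Prod.fst)).map
          (fun c => (((parents.zip values).filter (fun p => p.1 == c)).map (·.2)))) := by
    unfold group_siblings_by_parent
    simp only [hstep]
    have hfold : (PySem.List.pyRange 0 (values.length : Int) 1).foldl
        (fun (d : PySem.Dict Int (List Int)) (i : Int) =>
          PySem.Dict.modify d (PySem.List.pyGetD parents i 0) [] (· ++ [PySem.List.pyGetD values i 0]))
        PySem.Dict.empty
        = (((PySem.List.pyRange 0 (values.length : Int) 1).map
            (fun i => ((PySem.List.pyGetD parents i 0 : Int), (PySem.List.pyGetD values i 0 : Int)))).foldl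
          (fun (d : PySem.Dict Int (List Int)) (p : Int × Int) => PySem.Dict.modify d p.1 [] (· ++ [p.2]))
          PySem.Dict.empty) :=
      Eq.symm List.foldl_map
    rw [hfold, indexed_map_eq_zip values parents h]
    have hnodup : ((parents.zip values).foldl
        (fun (d : PySem.Dict Int (List Int)) (p : Int × Int) => PySem.Dict.modify d p.1 [] (· ++ [p.2]))
        PySem.Dict.empty).keys.Nodup :=
      PySem.Dict.nodup_keys_foldl_modify_key (parents.zip values) Prod.fst []
        (fun _ p => (· ++ [p.2])) PySem.Dict.empty (by simp [PySem.Dict.keys_empty])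
    rw [PySem.Dict.values_eq_map_keys _ hnodup []]
    have hkeys : ((parents.zip values).foldl
        (fun (d : PySem.Dict Int (List Int)) (p : Int × Int) => PySem.Dict.modify d p.1 [] (· ++ [p.2]))
        PySem.Dict.empty).keys = PySem.Set.ofList ((parents.zip values).map Prod.fst) := by
      have := PySem.Dict.keys_foldl_modify_key (l := parents.zip values) (key := Prod.fst)
        (d0 := ([] : List Int)) (f := fun _ p => (· ++ [p.2])) (d := PySem.Dict.empty)
      simpa [PySem.Dict.keys_empty, PySem.Set.update_empty] using this
    rw [hkeys]
    apply List.map_congr_left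
    intro c hc
    have := PySem.Dict.getD_foldl_modify_append (parents.zip values) PySem.Dict.empty c
    simpa [PySem.Dict.getD_empty] using this
  have hB : group_siblings_by_parent_alt values parents
      = ((PySem.Set.ofList (parents.take values.length)).map
          (fun p => (((values.zip parents).filter (fun vq => vq.2 == p)).map (·.1)))) := by
    unfold group_siblings_by_parent_alt
    have hfoldB : (PySem.List.pyRange 0 (values.length : Int) 1).foldl
        (fun (st : PySem.Set Int × List Int) i =>
          let p := PySem.List.pyGetD parents i 0
          if PySem.Set.contains st.1 p then st else (PySem.Set.add st.1 p, st.2 ++ [p]))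
        (PySem.Set.empty, [])
        = ((PySem.List.pyRange 0 (values.length : Int) 1).map
            (fun i => (PySem.List.pyGetD parents i 0 : Int))).foldl
          (fun (st : PySem.Set Int × List Int) p =>
            if PySem.Set.contains st.1 p then st else (PySem.Set.add st.1 p, st.2 ++ [p]))
          (PySem.Set.empty, []) :=
      Eq.symm List.foldl_map
    rw [hfoldB, indexed_map_parents values parents h]
    have hpair : (PySem.Set.empty, ([] : List Int)) = ((PySem.Set.empty : PySem.Set Int), (PySem.Set.empty : List Int)) := rfl
    rw [hpair, keys_fold (parents.take values.length) PySem.Set.empty]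
    have he : (PySem.Set.empty : PySem.Set Int) = [] := rfl
    rw [he, ← PySem.Set.ofList_eq_foldl]
  rw [hA, hB]
  have hk : (parents.zip values).map Prod.fst = parents.take values.length := by
    rw [zip_eq_take_zip parents values]
    exact List.map_fst_zip (by simp)
  rw [hk]
  apply List.map_congr_left
  intro c hc
  rw [← List.zip_swap parents values, List.filter_map, List.map_map]
  rfl

-- ===== VERDICT (by name: the statement is the Claim_ definition above) =====
theorem group_siblings_by_parent_spec : Claim_equal_group_siblings_by_parent := by
  intro values parents _ hpre
  unfold Pre_group_siblings_by_parent at hpre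
  unfold Spec_group_siblings_by_parent
  exact group_siblings_by_parent_AB values parents hpre
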